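-- pv_equiv track=rewrite | github.com/ikaushikpal/DS-450-python | tcs2.py | solve
-- ===== SOURCE A (Python) =====
-- def solve(nums, n):
--     tot = i = 0
--     while i < n:
--         ele = nums[i]
--         if ele < 0:
--             while i < n and nums[i] < 0:
--                 ele = max(ele, nums[i])
--                 i += 1
--         else:
--             while i < n and nums[i] >= 0:
--                 ele = max(ele, nums[i])
--                 i += 1
--         tot += ele
--     return tot
-- ===== SOURCE B (Python) =====
-- def solve(nums, n):
--     # Group the first n elements into consecutive same-sign runs (negatives
--     # vs non-negatives), then sum the maximum of each run.
--     runs = []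
--     for x in nums[:max(n, 0)]:
--         if runs and (runs[0][0] < 0) == (x < 0):
--             runs[0].append(x)
--         else:
--             runs.insert(0, [x])
--     return sum(max(r) for r in runs)
-- ===== Notes on version B (the rewrite author's own statement) =====
-- stated objective: alternative
-- what changed: B makes one pass that groups the first n elements into consecutive same-sign runs and then sums each run's maximum, replacing A's index pointer with sign-branched nested while loops.
-- outside the precondition, e.g. on solve([1, 2], 5): A raises IndexError, B returns 2
import Mathlib
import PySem

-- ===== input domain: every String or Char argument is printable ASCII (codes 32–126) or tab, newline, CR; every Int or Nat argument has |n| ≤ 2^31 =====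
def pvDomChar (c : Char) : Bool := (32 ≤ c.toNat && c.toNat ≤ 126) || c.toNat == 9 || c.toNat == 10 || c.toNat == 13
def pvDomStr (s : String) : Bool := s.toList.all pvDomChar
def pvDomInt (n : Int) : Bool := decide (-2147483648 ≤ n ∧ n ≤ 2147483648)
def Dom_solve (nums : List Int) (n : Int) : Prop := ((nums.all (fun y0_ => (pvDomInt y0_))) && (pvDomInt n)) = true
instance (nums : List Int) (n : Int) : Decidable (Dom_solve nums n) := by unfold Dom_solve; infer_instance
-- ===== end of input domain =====

-- B groups the first n elements into consecutive same-sign runs in one pass and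
-- sums each run's maximum, replacing A's index pointer with nested while loops
-- (alternative decomposition, same cost).

-- ===== PORT A =====
-- A's two inner while loops ('nums[i] < 0' / 'nums[i] >= 0') share one shape;
-- s = true is the negative branch, s = false the non-negative one.
-- nums[i] is PySem.List.pyGetD nums i 0: inside Pre_solve every access is in range,
-- so the default 0 is never read.  The while loops are ported with a fuel of
-- n.toNat steps: the index i strictly increases towards n, so inside Pre_solve
-- the fuel is never exhausted.
def runA (nums : List Int) (n : Int) (s : Bool) : Nat → Int → Int → Int × Int
  | 0, ele, i => (ele, i)
  | fuel + 1, ele, i =>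
    if i < n ∧ decide (PySem.List.pyGetD nums i 0 < 0) = s then
      runA nums n s fuel (max ele (PySem.List.pyGetD nums i 0)) (i + 1)
    else (ele, i)

def outerA (nums : List Int) (n : Int) : Nat → Int → Int → Int
  | 0, tot, _ => tot
  | fuel + 1, tot, i =>
    if i < n then
      let ele := PySem.List.pyGetD nums i 0
      let p := runA nums n (decide (ele < 0)) n.toNat ele i
      outerA nums n fuel (tot + p.1) p.2
    else tot

def solve (nums : List Int) (n : Int) : Int := outerA nums n n.toNat 0 0

-- ===== PORT B =====
-- Source B's loop body: append x to the current run if the signs agree, else open a new run at the front.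
def stepB (runs : List (List Int)) (x : Int) : List (List Int) :=
  match runs with
  | (y :: r) :: rs =>
      if decide (y < 0) = decide (x < 0) then ((y :: r) ++ [x]) :: rs
      else [x] :: (y :: r) :: rs
  | _ => [x] :: runs

-- sum(max(r) for r in runs); runs are nonempty, so getD's default is never read
def sumB (runs : List (List Int)) : Int :=
  runs.foldl (fun acc r => acc + (PySem.List.max? r id).getD 0) 0

def solve_alt (nums : List Int) (n : Int) : Int :=
  sumB ((PySem.List.slice nums none (some (max n 0))).foldl stepB [])

-- ===== PRECONDITION & SPEC =====
-- Pre_ excludes exactly the inputs where A raises IndexError: n beyond the list length.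
def Pre_solve (nums : List Int) (n : Int) : Prop := n ≤ (nums.length : Int)
instance (nums : List Int) (n : Int) : Decidable (Pre_solve nums n) := by unfold Pre_solve; infer_instance
def pvWitness_solve : List Int × Int := ([1, -2, 3], 3)

def Spec_solve (nums : List Int) (n : Int) (out : Int) : Prop := out = solve_alt nums n
instance (nums : List Int) (n : Int) (out : Int) : Decidable (Spec_solve nums n out) := by unfold Spec_solve; infer_instance

-- ===== CLAIM (what is proved, stated in full; the proofs are below) =====
def Claim_equal_solve : Prop := ∀ (nums : List Int) (n : Int), Dom_solve nums n → Pre_solve nums n → Spec_solve nums n (solve nums n)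

-- ===== LEMMAS AND PROOFS =====

-- common reference: one-pass sum of run maxima, carrying the current run's max m and sign s
def refAux (m : Int) (s : Bool) : List Int → Int
  | [] => m
  | x :: xs => if decide (x < 0) = s then refAux (max m x) s xs else m + refAux x (decide (x < 0)) xs

def ref : List Int → Int
  | [] => 0
  | x :: xs => refAux x (decide (x < 0)) xs

-- ---- B side ----

lemma max?_cons (y : Int) (r : List Int) :
    (PySem.List.max? (y :: r) id).getD 0 = List.foldl max y r := by
  have key : ∀ (r : List Int) (y : Int), PySem.List.max? (y :: r) id = some (List.foldl max y r) := by
    intro r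
    induction r with
    | nil => intro y; rfl
    | cons x t ih =>
      intro y
      have h1 : PySem.List.max? (y :: x :: t) id = PySem.List.max? (max y x :: t) id := by
        simp only [PySem.List.max?, List.foldl, id]
        by_cases h : y < x
        · simp [h, max_eq_right h.le]
        · simp [h, max_eq_left (not_lt.mp h)]
      rw [h1, ih (max y x)]
      rfl
  rw [key r y]
  rfl

lemma foldl_add_shift : ∀ (rs : List (List Int)) (a : Int),
    rs.foldl (fun acc r => acc + (PySem.List.max? r id).getD 0) a = a + sumB rs := by
  intro rs
  induction rs with
  | nil => intro a; simp [sumB]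
  | cons c t ih =>
    intro a
    simp only [List.foldl, sumB] at *
    rw [ih, ih ((0:Int) + (PySem.List.max? c id).getD 0)]
    ring

lemma sumB_cons (c : List Int) (rs : List (List Int)) :
    sumB (c :: rs) = (PySem.List.max? c id).getD 0 + sumB rs := by
  have h2 : sumB (c :: rs) = ((0:Int) + (PySem.List.max? c id).getD 0) + sumB rs :=
    foldl_add_shift rs ((0:Int) + (PySem.List.max? c id).getD 0)
  rw [h2]
  ring

lemma foldB (xs : List Int) : ∀ (y : Int) (r : List Int) (rs : List (List Int)),
    sumB (xs.foldl stepB ((y :: r) :: rs)) = refAux (r.foldl max y) (decide (y < 0)) xs + sumB rs := by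
  induction xs with
  | nil =>
    intro y r rs
    simp only [List.foldl, refAux, sumB_cons, max?_cons]
  | cons x t ih =>
    intro y r rs
    simp only [List.foldl, stepB]
    by_cases h : decide (y < 0) = decide (x < 0)
    · have hmax : (r ++ [x]).foldl max y = max (r.foldl max y) x := by
        rw [List.foldl_append]
        rfl
      have hr : refAux (List.foldl max y r) (decide (y < 0)) (x :: t)
          = refAux (max (List.foldl max y r) x) (decide (y < 0)) t := by
        simp only [refAux]
        rw [if_pos h.symm]
      rw [if_pos h, show ((y :: r) ++ [x]) = y :: (r ++ [x]) from rfl, ih y (r ++ [x]) rs, hmax, hr]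
    · have hr : refAux (List.foldl max y r) (decide (y < 0)) (x :: t)
          = List.foldl max y r + refAux x (decide (x < 0)) t := by
        simp only [refAux]
        rw [if_neg (fun hc => h hc.symm)]
      rw [if_neg h, ih x [] ((y :: r) :: rs), hr, sumB_cons, max?_cons]
      simp only [List.foldl]
      ring

lemma solve_alt_eq (nums : List Int) (n : Int) :
    solve_alt nums n = ref (nums.take (max n 0).toNat) := by
  unfold solve_alt
  have hs : PySem.List.slice nums none (some (max n 0)) = nums.take (max n 0).toNat :=
    PySem.List.slice_to nums (le_max_right n 0)
  rw [hs]
  cases h : nums.take (max n 0).toNat with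
  | nil => simp [sumB, ref]
  | cons x t =>
    simp only [List.foldl, stepB]
    rw [foldB t x [] []]
    simp [ref, sumB]

-- ---- A side ----

-- A's inner loop on the remaining list: (final ele, number of consumed elements)
def innerL (s : Bool) : Int → List Int → Int × Nat
  | ele, [] => (ele, 0)
  | ele, x :: xs =>
    if decide (x < 0) = s then
      ((innerL s (max ele x) xs).1, (innerL s (max ele x) xs).2 + 1)
    else (ele, 0)

lemma refAux_innerL (xs : List Int) : ∀ (m : Int) (s : Bool),
    refAux m s xs = (innerL s m xs).1 + ref (xs.drop (innerL s m xs).2) := by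
  induction xs with
  | nil => intro m s; simp [refAux, innerL, ref]
  | cons x t ih =>
    intro m s
    by_cases h : decide (x < 0) = s
    · simp only [refAux, innerL, if_pos h]
      rw [ih (max m x) s]
      rfl
    · simp only [refAux, innerL, if_neg h]
      simp [ref]

lemma drop_take_cons (nums : List Int) (t j : Nat) (hj : j < t) (hlen : j < nums.length) :
    (nums.take t).drop j = nums[j] :: (nums.take t).drop (j + 1) := by
  have h1 : j < (nums.take t).length := by simp; omega
  rw [List.drop_eq_getElem_cons h1]
  congr 1
  simp

lemma runA_spec (nums : List Int) (n : Int) (hn : n ≤ (nums.length : Int)) (s : Bool) :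
    ∀ (fuel : Nat) (j : Nat) (ele : Int), n.toNat - j ≤ fuel →
      runA nums n s fuel ele (j : Int) =
        ((innerL s ele ((nums.take n.toNat).drop j)).1,
         (j : Int) + ((innerL s ele ((nums.take n.toNat).drop j)).2 : Int)) := by
  intro fuel
  induction fuel with
  | zero =>
    intro j ele h
    have hj : ¬ ((j : Int) < n) := by omega
    have hd : (nums.take n.toNat).drop j = [] := by
      apply List.drop_eq_nil_of_le
      simp
      omega
    rw [hd]
    simp [runA, innerL]
  | succ fuel ih =>
    intro j ele h
    by_cases hj : (j : Int) < n
    · have hjn : j < n.toNat := by omega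
      have hjl : j < nums.length := by omega
      have hget : PySem.List.pyGetD nums (j : Int) 0 = nums[j] := by
        simp [PySem.List.pyGetD_natCast, List.getD_eq_getElem?_getD, hjl]
      rw [drop_take_cons nums n.toNat j hjn hjl]
      by_cases hs : decide (nums[j] < 0) = s
      · rw [runA, if_pos ⟨hj, by rw [hget]; exact hs⟩, hget]
        have hcast : (j : Int) + 1 = ((j + 1 : Nat) : Int) := by push_cast; ring
        rw [hcast, ih (j + 1) (max ele nums[j]) (by omega)]
        simp only [innerL, if_pos hs]
        rw [Prod.mk.injEq]
        refine ⟨rfl, ?_⟩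
        push_cast
        ring
      · rw [runA, if_neg (fun hc => hs (by rw [← hget]; exact hc.2))]
        simp [innerL, hs]
    · have hd : (nums.take n.toNat).drop j = [] := by
        apply List.drop_eq_nil_of_le
        simp
        omega
      rw [runA, if_neg (fun hc => hj hc.1), hd]
      simp [innerL]

lemma outerA_spec (nums : List Int) (n : Int) (hn : n ≤ (nums.length : Int)) :
    ∀ (fuel : Nat) (j : Nat) (tot : Int), n.toNat - j ≤ fuel →
      outerA nums n fuel tot (j : Int) = tot + ref ((nums.take n.toNat).drop j) := by
  intro fuel
  induction fuel with
  | zero =>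
    intro j tot h
    have hd : (nums.take n.toNat).drop j = [] := by
      apply List.drop_eq_nil_of_le
      simp
      omega
    rw [hd]
    simp [outerA, ref]
  | succ fuel ih =>
    intro j tot h
    by_cases hj : (j : Int) < n
    · have hjn : j < n.toNat := by omega
      have hjl : j < nums.length := by omega
      have hget : PySem.List.pyGetD nums (j : Int) 0 = nums[j] := by
        simp [PySem.List.pyGetD_natCast, List.getD_eq_getElem?_getD, hjl]
      rw [outerA, if_pos hj]
      simp only [hget]
      set x := nums[j] with hx
      set s := decide (x < 0) with hsdef
      set L := (nums.take n.toNat).drop (j + 1) with hL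
      have hdt : (nums.take n.toNat).drop j = x :: L := drop_take_cons nums n.toNat j hjn hjl
      have hrun := runA_spec nums n hn s n.toNat j x (by omega)
      rw [hdt] at hrun
      have hinner : innerL s x (x :: L) = ((innerL s x L).1, (innerL s x L).2 + 1) := by
        simp [innerL, hsdef, max_self]
      rw [hinner] at hrun
      rw [hrun]
      have hcast : (j : Int) + ((innerL s x L).2 + 1 : Nat) = ((j + 1 + (innerL s x L).2 : Nat) : Int) := by
        push_cast; ring
      rw [hcast, ih (j + 1 + (innerL s x L).2) (tot + (innerL s x L).1) (by omega)]
      have hdd : (nums.take n.toNat).drop (j + 1 + (innerL s x L).2) = L.drop (innerL s x L).2 := by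
        rw [hL, List.drop_drop, Nat.add_comm]
      rw [hdd]
      have : ref (x :: L) = (innerL s x L).1 + ref (L.drop (innerL s x L).2) := by
        show refAux x (decide (x < 0)) L = _
        rw [← hsdef, refAux_innerL]
      rw [hdt, this]
      ring
    · have hd : (nums.take n.toNat).drop j = [] := by
        apply List.drop_eq_nil_of_le
        simp
        omega
      rw [outerA, if_neg hj, hd]
      simp [ref]

lemma max_toNat (n : Int) : (max n 0).toNat = n.toNat := by
  rcases le_total n 0 with h | h
  · rw [max_eq_right h]; omega
  · rw [max_eq_left h]

-- ===== VERDICT (by name: the statement is the Claim_ definition above) =====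
theorem solve_spec : Claim_equal_solve := by
  intro nums n _ hpre
  show solve nums n = solve_alt nums n
  rw [solve_alt_eq, max_toNat]
  unfold solve
  have h := outerA_spec nums n hpre n.toNat 0 0 (by omega)
  simpa using h
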